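-- pv_equiv track=rewrite | github.com/ace-ecosystem/ACE | saq/util/__init__.py | iterate_fqdn_parts
-- ===== SOURCE A (Python) =====
-- def iterate_fqdn_parts(fqdn, reverse=False):
--     """For a.b.c.d iterates d, c.d, b.c.d, a.b.c.d."""
--     parsed_fqdn = fqdn.split('.')
--     parsed_fqdn.reverse()
--     for i in range(1, len(parsed_fqdn) + 1):
--         partial_fqdn = parsed_fqdn[:i]
--         partial_fqdn.reverse()
--         partial_fqdn = '.'.join(partial_fqdn)
--         yield partial_fqdn
--
--     return
-- ===== SOURCE B (Python) =====
-- def iterate_fqdn_parts(fqdn, reverse=False):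
--     """For a.b.c.d iterates d, c.d, b.c.d, a.b.c.d."""
--     suffix = None
--     for part in reversed(fqdn.split('.')):
--         suffix = part if suffix is None else part + '.' + suffix
--         yield suffix
-- ===== Notes on version B (the rewrite author's own statement) =====
-- stated objective: simpler
-- what changed: Instead of slicing the reversed part list, re-reversing and re-joining a fresh prefix on every iteration, B does one pass over the reversed parts extending a running suffix string (None-sentinel for the first part) and yields it after each extension.
import Mathlib
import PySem

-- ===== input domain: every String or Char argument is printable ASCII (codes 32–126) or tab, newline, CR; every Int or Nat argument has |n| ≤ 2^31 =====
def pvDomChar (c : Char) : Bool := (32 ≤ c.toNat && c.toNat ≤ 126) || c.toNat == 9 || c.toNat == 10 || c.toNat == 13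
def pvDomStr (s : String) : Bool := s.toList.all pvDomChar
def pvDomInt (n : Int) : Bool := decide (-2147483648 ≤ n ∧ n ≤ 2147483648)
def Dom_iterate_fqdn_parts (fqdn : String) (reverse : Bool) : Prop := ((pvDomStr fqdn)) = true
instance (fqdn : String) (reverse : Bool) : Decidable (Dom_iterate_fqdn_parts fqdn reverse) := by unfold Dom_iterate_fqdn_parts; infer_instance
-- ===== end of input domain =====

-- B replaces A's slice-reverse-join of a fresh prefix on every iteration by a single pass
-- that extends a running suffix string (objective: simpler; the generator is ported as the list of its yields).

-- ===== PORT A =====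
def iterate_fqdn_parts (fqdn : String) (reverse : Bool) : List String :=
  -- fqdn.split('.'): '.' is a nonempty separator, so split? is always `some`; getD never takes the default
  let parsed := ((PySem.Str.split? fqdn ".").getD []).reverse
  (PySem.List.pyRange 1 ((parsed.length : Int) + 1) 1).foldl
    (fun out i =>
      out ++ [PySem.Str.join "." (PySem.List.slice parsed none (some i)).reverse]) []

-- ===== PORT B =====
-- the loop: suffix starts as None; each reversed part extends it; each new suffix is yielded
def pvAltLoop (parts : List String) (suffix : Option String) : List String :=
  match parts with
  | [] => []
  | p :: rest =>
      let s := match suffix with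
               | none => p
               | some s0 => PySem.Str.join "." [p, s0]   -- p + '.' + s0
      s :: pvAltLoop rest (some s)

def iterate_fqdn_parts_alt (fqdn : String) (reverse : Bool) : List String :=
  pvAltLoop (((PySem.Str.split? fqdn ".").getD []).reverse) none

-- ===== PRECONDITION & SPEC =====
def Spec_iterate_fqdn_parts (fqdn : String) (reverse : Bool) (out : List String) : Prop := out = iterate_fqdn_parts_alt fqdn reverse
instance (fqdn : String) (reverse : Bool) (out : List String) : Decidable (Spec_iterate_fqdn_parts fqdn reverse out) := by unfold Spec_iterate_fqdn_parts; infer_instance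

-- ===== CLAIM (what is proved, stated in full; the proofs are below) =====
def Claim_equal_iterate_fqdn_parts : Prop := ∀ (fqdn : String) (reverse : Bool), Dom_iterate_fqdn_parts fqdn reverse → Spec_iterate_fqdn_parts fqdn reverse (iterate_fqdn_parts fqdn reverse)

-- ===== LEMMAS AND PROOFS =====

-- joining p in front of an already-joined nonempty list equals joining the extended list
theorem pv_join_cons (p : String) (prev : List String) (h : prev ≠ []) :
    PySem.Str.join "." [p, PySem.Str.join "." prev] = PySem.Str.join "." (p :: prev) := by
  cases prev with
  | nil => exact absurd rfl h
  | cons q qs =>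
      apply String.toList_injective
      simp [PySem.Str.toList_join, PySem.Chars.join_cons_cons, PySem.Chars.join_singleton]

-- the accumulator loop computes the joined reversed prefixes
theorem pvAltLoop_some (L : List String) : ∀ (prev : List String), prev ≠ [] →
    pvAltLoop L (some (PySem.Str.join "." prev)) =
      (List.range L.length).map (fun j => PySem.Str.join "." ((L.take (j+1)).reverse ++ prev)) := by
  induction L with
  | nil => intro prev _; rfl
  | cons p rest ih =>
      intro prev hprev
      simp only [pvAltLoop, List.length_cons, List.range_succ_eq_map, List.map_cons, List.map_map]
      rw [pv_join_cons p prev hprev]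
      refine List.cons_eq_cons.mpr ⟨by simp, ?_⟩
      rw [ih (p :: prev) (by simp)]
      apply List.map_congr_left
      intro j _
      simp [List.take_succ_cons, Function.comp]

theorem pvAltLoop_none (L : List String) :
    pvAltLoop L none =
      (List.range L.length).map (fun j => PySem.Str.join "." (L.take (j+1)).reverse) := by
  cases L with
  | nil => rfl
  | cons p rest =>
      have hp : p = PySem.Str.join "." [p] := by
        apply String.toList_injective
        simp [PySem.Str.toList_join, PySem.Chars.join_singleton]
      simp only [pvAltLoop, List.length_cons, List.range_succ_eq_map, List.map_cons, List.map_map]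
      refine List.cons_eq_cons.mpr ⟨by simpa using hp, ?_⟩
      conv_lhs => rw [hp]
      rw [pvAltLoop_some rest [p] (by simp)]
      apply List.map_congr_left
      intro j _
      simp [List.take_succ_cons, Function.comp]

-- A's loop over any part list equals B's accumulator loop
theorem pv_main (L : List String) :
    (PySem.List.pyRange 1 ((L.length : Int) + 1) 1).foldl
      (fun out i =>
        out ++ [PySem.Str.join "." (PySem.List.slice L none (some i)).reverse]) [] =
      pvAltLoop L none := by
  rw [PySem.List.foldl_append_singleton_eq_map, PySem.List.pyRange_one, pvAltLoop_none]
  simp only [List.map_map, List.nil_append, Int.add_sub_cancel, Int.toNat_natCast]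
  apply List.map_congr_left
  intro j _
  have h2 : PySem.List.slice L none (some (1 + (j : Int))) = L.take (j + 1) := by
    rw [PySem.List.slice_to]
    · congr 1
      omega
    · omega
  simp [Function.comp, h2]

-- ===== VERDICT (by name: the statement is the Claim_ definition above) =====
theorem iterate_fqdn_parts_spec : Claim_equal_iterate_fqdn_parts := by
  intro fqdn reverse _
  unfold Spec_iterate_fqdn_parts iterate_fqdn_parts iterate_fqdn_parts_alt
  exact pv_main _
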